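-- pv_equiv track=rewrite | github.com/Dodo327/PPPD | lab_7/lab7.py | get_top_indexes
-- ===== SOURCE A (Python) =====
-- def get_top_indexes(arr):
--     n = len(arr)
--     top_index_nr = 0
--
--     for i in range(n):
--         if i == 0:
--             x0 = float('-inf')
--         else:
--             x0 = arr[i - 1]
--
--         x1 = arr[i]
--
--         if i == n - 1:
--             x2 = float('-inf')
--         else:
--             x2 = arr[i + 1]
--
--         if x0 < x1  and x1 > x2 :
--             top_index_nr += 1
--
--     top_indexes = [None] * top_index_nr
--     top_index_nr = 0
--
--     for i in range(n):
--         if i == 0: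
--             x0 = - float('inf')
--         else:
--             x0 = arr[i - 1]
--
--         x1 = arr[i]
--
--         if i == n - 1:
--             x2 = float('-inf')
--         else:
--             x2 = arr[i + 1]
--
--         if x0 < x1 and x1 > x2:
--             top_indexes[top_index_nr] = i
--             top_index_nr += 1
--
--     return top_indexes
-- ===== SOURCE B (Python) =====
-- def get_top_indexes(arr):
--     n = len(arr)
--     return [i for i in range(n)
--             if (i == 0 or arr[i - 1] < arr[i]) and (i == n - 1 or arr[i] > arr[i + 1])]
-- ===== Notes on version B (the rewrite author's own statement) =====
-- stated objective: simpler
-- what changed: Replaces A's two passes (count local maxima, preallocate a [None]*k list, refill it with a manual write cursor) by a single list comprehension that filters range(n) on the boundary-aware local-maximum condition directly; one pass instead of two gives a constant-factor speedup.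
import Mathlib
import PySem

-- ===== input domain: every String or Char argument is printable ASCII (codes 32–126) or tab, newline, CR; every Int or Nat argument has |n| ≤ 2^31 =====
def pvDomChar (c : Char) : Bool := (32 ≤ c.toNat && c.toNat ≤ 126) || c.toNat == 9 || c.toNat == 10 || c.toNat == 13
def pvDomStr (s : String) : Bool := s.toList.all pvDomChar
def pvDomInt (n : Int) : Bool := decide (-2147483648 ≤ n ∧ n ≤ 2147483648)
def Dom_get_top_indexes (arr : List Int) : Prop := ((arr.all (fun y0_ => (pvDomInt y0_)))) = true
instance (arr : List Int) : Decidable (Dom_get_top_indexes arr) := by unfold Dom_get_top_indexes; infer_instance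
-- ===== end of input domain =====

-- B replaces A's two passes (count, preallocate [None]*k, refill with a write cursor) by a
-- single filtering pass over range(n); same O(n) cost, shorter and plainer.

-- ===== PORT A =====
-- Python compares float('-inf') with ints; `none` models -inf here, `pvNInfLt a b` is Python's `a < b`
-- on these values (x1 > x2 is written pvNInfLt x2 x1, Python's `>` being the mirrored `<` on numbers).
def pvNInfLt : Option Int → Option Int → Bool
  | none, none => false
  | none, some _ => true
  | some _, none => false
  | some a, some b => decide (a < b)

-- the body of both of A's loops: x0, x1, x2 and the test (indices i-1, i, i+1 are in range
-- whenever the corresponding branch is taken, so pyGet? is `some` there).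
def pvCondA (arr : List Int) (n i : Int) : Bool :=
  let x0 : Option Int := if i = 0 then none else PySem.List.pyGet? arr (i - 1)
  let x1 : Option Int := PySem.List.pyGet? arr i
  let x2 : Option Int := if i = n - 1 then none else PySem.List.pyGet? arr (i + 1)
  pvNInfLt x0 x1 && pvNInfLt x2 x1

def get_top_indexes (arr : List Int) : List Int :=
  let n : Int := arr.length
  -- first loop: count the local maxima
  let top_index_nr : Nat :=
    (PySem.List.pyRange 0 n 1).foldl (fun k i => if pvCondA arr n i then k + 1 else k) 0
  -- top_indexes = [None] * top_index_nr; second loop writes i at the cursor position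
  let st :=
    (PySem.List.pyRange 0 n 1).foldl
      (fun (st : List (Option Int) × Nat) i =>
        if pvCondA arr n i then (st.1.set st.2 (some i), st.2 + 1) else st)
      (List.replicate top_index_nr none, 0)
  -- the returned Python list holds only ints (every slot was overwritten)
  st.1.filterMap id

-- ===== PORT B =====
def get_top_indexes_alt (arr : List Int) : List Int :=
  let n : Int := arr.length
  (PySem.List.pyRange 0 n 1).filter (fun i =>
    (i == 0 || PySem.List.pyGetD arr (i - 1) 0 < PySem.List.pyGetD arr i 0) &&
    (i == n - 1 || PySem.List.pyGetD arr i 0 > PySem.List.pyGetD arr (i + 1) 0))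

-- ===== PRECONDITION & SPEC =====
def Spec_get_top_indexes (arr : List Int) (out : List Int) : Prop := out = get_top_indexes_alt arr
instance (arr : List Int) (out : List Int) : Decidable (Spec_get_top_indexes arr out) := by unfold Spec_get_top_indexes; infer_instance

-- ===== CLAIM (what is proved, stated in full; the proofs are below) =====
def Claim_equal_get_top_indexes : Prop := ∀ (arr : List Int), Dom_get_top_indexes arr → Spec_get_top_indexes arr (get_top_indexes arr)

-- ===== LEMMAS AND PROOFS =====

-- the counting loop computes the filter's length
lemma pvCount (p : Int → Bool) (l : List Int) (k : Nat) :
    l.foldl (fun k i => if p i then k + 1 else k) k = k + (l.filter p).length := by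
  induction l generalizing k with
  | nil => simp
  | cons a l ih =>
    by_cases h : p a
    · simp [h, ih]
      omega
    · simp [h, ih]

-- the fill loop, started on [None]*(number of hits) with the cursor at pre.length,
-- after already having written pre, ends with exactly the hits written in order
lemma pvFill (p : Int → Bool) (l : List Int) (pre : List Int) :
    (l.foldl (fun (st : List (Option Int) × Nat) i =>
        if p i then (st.1.set st.2 (some i), st.2 + 1) else st)
      (pre.map some ++ List.replicate (l.filter p).length none, pre.length)).1
    = (pre ++ l.filter p).map some := by
  induction l generalizing pre with
  | nil => simp
  | cons a l ih =>
    by_cases h : p a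
    · have hset : (pre.map some ++ List.replicate (l.filter p).length.succ none).set
          pre.length (some a)
          = (pre ++ [a]).map some ++ List.replicate (l.filter p).length none := by
        simp [List.replicate_succ]
      have := ih (pre ++ [a])
      simp only [List.filter_cons, h, if_pos, List.length_cons, List.foldl_cons]
      simp only [hset]
      simp only [List.map_append] at this ⊢
      rw [show (pre.map some ++ [a].map some) = pre.map some ++ [some a] by simp] at this
      simp only [List.length_append, List.length_cons, List.length_nil] at this ⊢
      rw [show pre.length + 1 = pre.length + [some a].length by simp] at this
      simpa [List.append_assoc] using this
    · simpa [List.filter_cons, h] using ih pre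

-- the two tests agree on every index of range(n) (n = arr.length)
lemma pvCondEq (arr : List Int) (i : Int) (h0 : 0 ≤ i) (h1 : i < (arr.length : Int)) :
    pvCondA arr (arr.length : Int) i
    = ((i == 0 || PySem.List.pyGetD arr (i - 1) 0 < PySem.List.pyGetD arr i 0) &&
       (i == (arr.length : Int) - 1 ||
        PySem.List.pyGetD arr i 0 > PySem.List.pyGetD arr (i + 1) 0)) := by
  have hx1 : PySem.List.pyGet? arr i = some (PySem.List.pyGetD arr i 0) := by
    rw [PySem.List.pyGet?_eq_some_getElem arr h0 h1, PySem.List.pyGetD_eq_getElem arr 0 h0 h1]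
  unfold pvCondA
  by_cases hz : i = 0
  · by_cases hl : i = (arr.length : Int) - 1
    · rw [if_pos hz, if_pos hl, hx1]
      simp [pvNInfLt, hz]
      exact Or.inl (by omega)
    · have h0' : (0:Int) ≤ i + 1 := by omega
      have h1' : i + 1 < (arr.length : Int) := by omega
      have hx2 : PySem.List.pyGet? arr (i + 1) = some (PySem.List.pyGetD arr (i + 1) 0) := by
        rw [PySem.List.pyGet?_eq_some_getElem arr h0' h1', PySem.List.pyGetD_eq_getElem arr 0 h0' h1']
      rw [if_pos hz, if_neg hl, hx1, hx2]
      simp [pvNInfLt, hz]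
      intro h
      exact absurd (by omega : i = (arr.length : Int) - 1) hl
  · have h0' : (0:Int) ≤ i - 1 := by omega
    have h1' : i - 1 < (arr.length : Int) := by omega
    have hx0 : PySem.List.pyGet? arr (i - 1) = some (PySem.List.pyGetD arr (i - 1) 0) := by
      rw [PySem.List.pyGet?_eq_some_getElem arr h0' h1', PySem.List.pyGetD_eq_getElem arr 0 h0' h1']
    by_cases hl : i = (arr.length : Int) - 1
    · rw [if_neg hz, if_pos hl, hx0, hx1]
      simp [pvNInfLt, hl]
      intro h
      exact absurd (by omega : i = (0 : Int)) hz
    · have h0'' : (0:Int) ≤ i + 1 := by omega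
      have h1'' : i + 1 < (arr.length : Int) := by omega
      have hx2 : PySem.List.pyGet? arr (i + 1) = some (PySem.List.pyGetD arr (i + 1) 0) := by
        rw [PySem.List.pyGet?_eq_some_getElem arr h0'' h1'', PySem.List.pyGetD_eq_getElem arr 0 h0'' h1'']
      rw [if_neg hz, if_neg hl, hx0, hx1, hx2]
      rw [beq_eq_false_iff_ne.mpr hz, beq_eq_false_iff_ne.mpr hl]
      simp [pvNInfLt]

-- ===== VERDICT (by name: the statement is the Claim_ definition above) =====
theorem get_top_indexes_spec : Claim_equal_get_top_indexes := by
  intro arr _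
  unfold Spec_get_top_indexes get_top_indexes get_top_indexes_alt
  simp only []
  have hcnt := pvCount (pvCondA arr (arr.length : Int))
      (PySem.List.pyRange 0 (arr.length : Int) 1) 0
  rw [hcnt]
  simp only [Nat.zero_add]
  have hfill := pvFill (pvCondA arr (arr.length : Int))
      (PySem.List.pyRange 0 (arr.length : Int) 1) []
  simp only [List.map_nil, List.nil_append, List.length_nil] at hfill
  rw [hfill]
  rw [List.filter_congr (fun i hi => by
    have hm := (PySem.List.mem_pyRange_one (a := 0) (b := (arr.length : Int))).mp hi
    exact pvCondEq arr i hm.1 hm.2)]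
  simp
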